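-- pv_equiv track=rewrite | github.com/johnliu0/tetro | tetromino.py | rotationally_unique
-- ===== SOURCE A (Python) =====
-- def rotationally_unique(block_data1, block_data2):
--     size = len(block_data1);
--     # find minimally enclosing box for each tetromino
--     cols1, rows1, cols2, rows2 = set(), set(), set(), set()
--     for x in range(size):
--         for y in range(size):
--             if block_data1[x][y]:
--                 cols1.add(x)
--                 rows1.add(y)
--             if block_data2[x][y]:
--                 cols2.add(x)
--                 rows2.add(y)
--     width1 = max(cols1) - min(cols1) + 1
--     height1 = max(rows1) - min(rows1) + 1
--     width2 = max(cols2) - min(cols2) + 1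
--     height2 = max(rows2) - min(rows2) + 1
--     # they must be different if their dimensions differ
--     if width1 != width2 or height1 != height2:
--         return True
--
--     for i in range(width1):
--         for j in range(height1):
--             if block_data1[i + min(cols1)][j + min(rows1)] != block_data2[i + min(cols2)][j + min(rows2)]:
--                 return True
--     return False
-- ===== SOURCE B (Python) =====
-- def rotationally_unique(block_data1, block_data2):
--     size = len(block_data1)
--
--     def shape(grid):
--         cells = [(x, y, grid[x][y]) for x in range(size) for y in range(size) if grid[x][y]]
--         x0 = min(c[0] for c in cells)
--         y0 = min(c[1] for c in cells)
--         return {(x - x0, y - y0, v) for x, y, v in cells}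
--
--     return shape(block_data1) != shape(block_data2)
-- ===== Notes on version B (the rewrite author's own statement) =====
-- stated objective: alternative
-- what changed: B represents each tetromino as a set of min-normalized (x, y, value) triples of its nonzero cells and returns whether the two sets differ, eliminating A's dimension comparison and its second nested loop over the bounding box.
import Mathlib
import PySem

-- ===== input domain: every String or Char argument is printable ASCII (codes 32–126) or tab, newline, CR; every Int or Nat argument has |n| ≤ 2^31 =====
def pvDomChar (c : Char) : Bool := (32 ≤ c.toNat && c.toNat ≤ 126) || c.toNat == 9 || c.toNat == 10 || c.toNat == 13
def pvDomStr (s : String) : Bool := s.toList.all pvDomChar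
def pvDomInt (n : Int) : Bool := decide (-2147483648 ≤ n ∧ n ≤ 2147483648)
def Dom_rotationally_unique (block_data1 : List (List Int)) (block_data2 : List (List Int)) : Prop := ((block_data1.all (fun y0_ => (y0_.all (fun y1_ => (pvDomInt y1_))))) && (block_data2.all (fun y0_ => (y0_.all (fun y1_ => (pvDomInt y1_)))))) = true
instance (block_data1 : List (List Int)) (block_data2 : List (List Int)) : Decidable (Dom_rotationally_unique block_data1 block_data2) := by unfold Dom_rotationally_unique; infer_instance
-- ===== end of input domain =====

-- B represents each tetromino as the SET of min-normalized (x, y, value) triples of its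
-- nonzero cells and returns whether the two sets differ, replacing A's dimension check
-- plus nested bounding-box cell loop (objective: alternative).

-- ===== PORT A =====
-- literal transliteration of A; the .getD 0 after min?/max? is only a totalizer:
-- Python raises ValueError there (empty set), excluded by Pre_.
def rotationally_unique (block_data1 : List (List Int)) (block_data2 : List (List Int)) : Bool :=
  let size : Int := block_data1.length
  let s :=
    (PySem.List.pyRange 0 size 1).foldl (fun s x =>
      (PySem.List.pyRange 0 size 1).foldl (fun (s : PySem.Set Int × PySem.Set Int × PySem.Set Int × PySem.Set Int) y =>
        let v1 := PySem.List.pyGetD (PySem.List.pyGetD block_data1 x []) y 0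
        let v2 := PySem.List.pyGetD (PySem.List.pyGetD block_data2 x []) y 0
        ((if v1 ≠ 0 then PySem.Set.add s.1 x else s.1),
         (if v1 ≠ 0 then PySem.Set.add s.2.1 y else s.2.1),
         (if v2 ≠ 0 then PySem.Set.add s.2.2.1 x else s.2.2.1),
         (if v2 ≠ 0 then PySem.Set.add s.2.2.2 y else s.2.2.2))) s)
      (([], [], [], []) : PySem.Set Int × PySem.Set Int × PySem.Set Int × PySem.Set Int)
  let cols1 := s.1
  let rows1 := s.2.1
  let cols2 := s.2.2.1
  let rows2 := s.2.2.2
  let width1 := ((PySem.List.max? cols1 (fun v => v)).getD 0) - ((PySem.List.min? cols1 (fun v => v)).getD 0) + 1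
  let height1 := ((PySem.List.max? rows1 (fun v => v)).getD 0) - ((PySem.List.min? rows1 (fun v => v)).getD 0) + 1
  let width2 := ((PySem.List.max? cols2 (fun v => v)).getD 0) - ((PySem.List.min? cols2 (fun v => v)).getD 0) + 1
  let height2 := ((PySem.List.max? rows2 (fun v => v)).getD 0) - ((PySem.List.min? rows2 (fun v => v)).getD 0) + 1
  if width1 ≠ width2 ∨ height1 ≠ height2 then true
  else
    (PySem.List.pyRange 0 width1 1).any (fun i =>
      (PySem.List.pyRange 0 height1 1).any (fun j =>
        PySem.List.pyGetD (PySem.List.pyGetD block_data1 (i + ((PySem.List.min? cols1 (fun v => v)).getD 0)) []) (j + ((PySem.List.min? rows1 (fun v => v)).getD 0)) 0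
          ≠ PySem.List.pyGetD (PySem.List.pyGetD block_data2 (i + ((PySem.List.min? cols2 (fun v => v)).getD 0)) []) (j + ((PySem.List.min? rows2 (fun v => v)).getD 0)) 0))

-- ===== PORT B =====
-- helper for B: the set of (x - x0, y - y0, value) triples of the nonzero cells of the
-- size×size window of grid; .getD 0 after min? only totalizes Python's ValueError (outside Pre_).
def pvShape (size : Int) (grid : List (List Int)) : PySem.Set (Int × Int × Int) :=
  let cells := (PySem.List.pyRange 0 size 1).flatMap (fun x =>
    (PySem.List.pyRange 0 size 1).filterMap (fun y =>
      if PySem.List.pyGetD (PySem.List.pyGetD grid x []) y 0 ≠ 0 then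
        some (x, y, PySem.List.pyGetD (PySem.List.pyGetD grid x []) y 0) else none))
  let x0 := (PySem.List.min? (cells.map (fun c => c.1)) (fun v => v)).getD 0
  let y0 := (PySem.List.min? (cells.map (fun c => c.2.1)) (fun v => v)).getD 0
  PySem.Set.ofList (cells.map (fun c => (c.1 - x0, c.2.1 - y0, c.2.2)))

def rotationally_unique_alt (block_data1 : List (List Int)) (block_data2 : List (List Int)) : Bool :=
  let size : Int := block_data1.length
  !(PySem.Set.equal (pvShape size block_data1) (pvShape size block_data2))

-- ===== PRECONDITION & SPEC =====
-- Pre_ = exactly the inputs where Python A returns: every cell of the size×size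
-- window (size = len(block_data1)) exists in both grids (else IndexError), and each
-- grid has a nonzero cell in that window (else ValueError from min/max of an empty set).
def Pre_rotationally_unique (block_data1 : List (List Int)) (block_data2 : List (List Int)) : Prop :=
  (block_data1.length ≤ block_data2.length) ∧
  (∀ row ∈ block_data1, block_data1.length ≤ row.length) ∧
  (∀ row ∈ block_data2.take block_data1.length, block_data1.length ≤ row.length) ∧
  (∃ x < block_data1.length, ∃ y < block_data1.length, (block_data1.getD x []).getD y 0 ≠ 0) ∧
  (∃ x < block_data1.length, ∃ y < block_data1.length, (block_data2.getD x []).getD y 0 ≠ 0)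
instance (block_data1 : List (List Int)) (block_data2 : List (List Int)) : Decidable (Pre_rotationally_unique block_data1 block_data2) := by unfold Pre_rotationally_unique; infer_instance

def pvWitness_rotationally_unique : List (List Int) × List (List Int) := ([[0, 1], [0, 1]], [[1, 0], [1, 0]])

def Spec_rotationally_unique (block_data1 : List (List Int)) (block_data2 : List (List Int)) (out : Bool) : Prop := out = rotationally_unique_alt block_data1 block_data2
instance (block_data1 : List (List Int)) (block_data2 : List (List Int)) (out : Bool) : Decidable (Spec_rotationally_unique block_data1 block_data2 out) := by unfold Spec_rotationally_unique; infer_instance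

-- ===== CLAIM (what is proved, stated in full; the proofs are below) =====
def Claim_equal_rotationally_unique : Prop := ∀ (block_data1 : List (List Int)) (block_data2 : List (List Int)), Dom_rotationally_unique block_data1 block_data2 → Pre_rotationally_unique block_data1 block_data2 → Spec_rotationally_unique block_data1 block_data2 (rotationally_unique block_data1 block_data2)

-- ===== LEMMAS AND PROOFS =====

-- value of cell (x, y) of a grid, Python-style indexing with defaults (used only in proofs)
def pvCell (g : List (List Int)) (x y : Int) : Int :=
  PySem.List.pyGetD (PySem.List.pyGetD g x []) y 0

theorem foldl_prod4 {a b : Type} (l : List a) (f1 f2 f3 f4 : b -> a -> b) (s : b × b × b × b) :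
    l.foldl (fun s e => (f1 s.1 e, f2 s.2.1 e, f3 s.2.2.1 e, f4 s.2.2.2 e)) s
      = (l.foldl f1 s.1, l.foldl f2 s.2.1, l.foldl f3 s.2.2.1, l.foldl f4 s.2.2.2) := by
  induction l generalizing s with
  | nil => rfl
  | cons e t ih => simp only [List.foldl_cons]; exact ih _

theorem mem_foldl_add_if {a : Type} (l : List a) (c : a -> Prop) [DecidablePred c]
    (f : a -> Int) (s : PySem.Set Int) (v : Int) :
    (v ∈ l.foldl (fun s e => if c e then PySem.Set.add s (f e) else s) s) ↔
      v ∈ s ∨ ∃ e ∈ l, c e ∧ v = f e := by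
  induction l generalizing s with
  | nil => simp
  | cons e t ih =>
    simp only [List.foldl_cons, ih]
    by_cases hc : c e
    · simp only [if_pos hc, PySem.Set.mem_add, List.mem_cons]
      constructor
      · rintro ((h|h)|h)
        · exact Or.inl h
        · exact Or.inr ⟨e, Or.inl rfl, hc, h⟩
        · obtain ⟨a', ha', hca', hv⟩ := h; exact Or.inr ⟨a', Or.inr ha', hca', hv⟩
      · rintro (h|⟨a', (rfl|ha'), hca', hv⟩)
        · exact Or.inl (Or.inl h)
        · exact Or.inl (Or.inr hv)
        · exact Or.inr ⟨a', ha', hca', hv⟩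
    · simp only [if_neg hc, List.mem_cons]
      constructor
      · rintro (h|⟨a', ha', hca', hv⟩)
        · exact Or.inl h
        · exact Or.inr ⟨a', Or.inr ha', hca', hv⟩
      · rintro (h|⟨a', (rfl|ha'), hca', hv⟩)
        · exact Or.inl h
        · exact absurd hca' hc
        · exact Or.inr ⟨a', ha', hca', hv⟩

theorem mem_foldl_foldl_add_if {a g : Type} (l1 : List a) (l2 : List g)
    (c : a -> g -> Prop) [∀ x y, Decidable (c x y)] (f : a -> g -> Int)
    (s : PySem.Set Int) (v : Int) :
    (v ∈ l1.foldl (fun s x => l2.foldl (fun s y => if c x y then PySem.Set.add s (f x y) else s) s) s) ↔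
      v ∈ s ∨ ∃ x ∈ l1, ∃ y ∈ l2, c x y ∧ v = f x y := by
  induction l1 generalizing s with
  | nil => simp
  | cons x t ih =>
    simp only [List.foldl_cons, ih, mem_foldl_add_if (c := c x) (f := f x), List.mem_cons]
    constructor
    · rintro ((h|⟨y, hy, hc', hv⟩)|⟨x', hx', y, hy, hc', hv⟩)
      · exact Or.inl h
      · exact Or.inr ⟨x, Or.inl rfl, y, hy, hc', hv⟩
      · exact Or.inr ⟨x', Or.inr hx', y, hy, hc', hv⟩
    · rintro (h|⟨x', (rfl|hx'), y, hy, hc', hv⟩)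
      · exact Or.inl (Or.inl h)
      · exact Or.inl (Or.inr ⟨y, hy, hc', hv⟩)
      · exact Or.inr ⟨x', hx', y, hy, hc', hv⟩

theorem min?_congr (l l' : List Int) (h : ∀ v, v ∈ l ↔ v ∈ l') :
    PySem.List.min? l (fun v => v) = PySem.List.min? l' (fun v => v) := by
  cases hl : PySem.List.min? l (fun v => v) with
  | none =>
    cases hl' : PySem.List.min? l' (fun v => v) with
    | none => rfl
    | some m' =>
      have hm' := PySem.List.min?_mem hl'
      have hnil : l = [] := (PySem.List.min?_eq_none_iff _ _).mp hl
      rw [hnil] at h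
      exact absurd ((h m').mpr hm') (List.not_mem_nil)
  | some m =>
    cases hl' : PySem.List.min? l' (fun v => v) with
    | none =>
      have hm := PySem.List.min?_mem hl
      have hnil : l' = [] := (PySem.List.min?_eq_none_iff _ _).mp hl'
      rw [hnil] at h
      exact absurd ((h m).mp hm) (List.not_mem_nil)
    | some m' =>
      have hm := PySem.List.min?_mem hl
      have hm' := PySem.List.min?_mem hl'
      have h1 := PySem.List.min?_isMin hl m' ((h m').mpr hm')
      have h2 := PySem.List.min?_isMin hl' m ((h m).mp hm)
      simp only [Option.some.injEq]
      omega

-- canonical forms of the column/row index collections A builds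
def colsOf (g : List (List Int)) (N : Int) : PySem.Set Int :=
  (PySem.List.pyRange 0 N 1).foldl (fun t x =>
    (PySem.List.pyRange 0 N 1).foldl (fun t y =>
      if pvCell g x y ≠ 0 then PySem.Set.add t x else t) t) []

def rowsOf (g : List (List Int)) (N : Int) : PySem.Set Int :=
  (PySem.List.pyRange 0 N 1).foldl (fun t x =>
    (PySem.List.pyRange 0 N 1).foldl (fun t y =>
      if pvCell g x y ≠ 0 then PySem.Set.add t y else t) t) []

def pvMin (l : List Int) : Int := (PySem.List.min? l (fun v => v)).getD 0
def pvMax (l : List Int) : Int := (PySem.List.max? l (fun v => v)).getD 0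

def Pfill (g : List (List Int)) (N x y : Int) : Prop :=
  0 ≤ x ∧ x < N ∧ 0 ≤ y ∧ y < N ∧ pvCell g x y ≠ 0

-- the list of (x, y, value) triples B collects
def cellsOf (g : List (List Int)) (N : Int) : List (Int × Int × Int) :=
  (PySem.List.pyRange 0 N 1).flatMap (fun x =>
    (PySem.List.pyRange 0 N 1).filterMap (fun y =>
      if PySem.List.pyGetD (PySem.List.pyGetD g x []) y 0 ≠ 0 then
        some (x, y, PySem.List.pyGetD (PySem.List.pyGetD g x []) y 0) else none))

theorem mem_colsOf (g : List (List Int)) (N v : Int) :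
    v ∈ colsOf g N ↔ ∃ x y, Pfill g N x y ∧ v = x := by
  unfold colsOf
  rw [mem_foldl_foldl_add_if (c := fun x y => pvCell g x y ≠ 0) (f := fun x _ => x)]
  simp only [List.not_mem_nil, false_or, PySem.List.mem_pyRange_one, Pfill]
  constructor
  · rintro ⟨x, ⟨hx0, hxN⟩, y, ⟨hy0, hyN⟩, hc, hv⟩
    exact ⟨x, y, ⟨hx0, hxN, hy0, hyN, hc⟩, hv⟩
  · rintro ⟨x, y, ⟨hx0, hxN, hy0, hyN, hc⟩, hv⟩
    exact ⟨x, ⟨hx0, hxN⟩, y, ⟨hy0, hyN⟩, hc, hv⟩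

theorem mem_rowsOf (g : List (List Int)) (N v : Int) :
    v ∈ rowsOf g N ↔ ∃ x y, Pfill g N x y ∧ v = y := by
  unfold rowsOf
  rw [mem_foldl_foldl_add_if (c := fun x y => pvCell g x y ≠ 0) (f := fun _ y => y)]
  simp only [List.not_mem_nil, false_or, PySem.List.mem_pyRange_one, Pfill]
  constructor
  · rintro ⟨x, ⟨hx0, hxN⟩, y, ⟨hy0, hyN⟩, hc, hv⟩
    exact ⟨x, y, ⟨hx0, hxN, hy0, hyN, hc⟩, hv⟩
  · rintro ⟨x, y, ⟨hx0, hxN, hy0, hyN, hc⟩, hv⟩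
    exact ⟨x, ⟨hx0, hxN⟩, y, ⟨hy0, hyN⟩, hc, hv⟩

theorem mem_cellsOf (g : List (List Int)) (N : Int) (t : Int × Int × Int) :
    t ∈ cellsOf g N ↔ ∃ x y, Pfill g N x y ∧ t = (x, y, pvCell g x y) := by
  unfold cellsOf
  simp only [List.mem_flatMap, List.mem_filterMap, PySem.List.mem_pyRange_one, Pfill, pvCell,
    Option.ite_none_right_eq_some, Option.some.injEq]
  constructor
  · rintro ⟨x, ⟨hx0, hxN⟩, y, ⟨hy0, hyN⟩, hc, hv⟩
    exact ⟨x, y, ⟨hx0, hxN, hy0, hyN, hc⟩, hv.symm⟩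
  · rintro ⟨x, y, ⟨hx0, hxN, hy0, hyN, hc⟩, hv⟩
    exact ⟨x, ⟨hx0, hxN⟩, y, ⟨hy0, hyN⟩, hc, hv.symm⟩

theorem mem_map_fst_cellsOf (g : List (List Int)) (N v : Int) :
    v ∈ (cellsOf g N).map (fun c => c.1) ↔ v ∈ colsOf g N := by
  rw [mem_colsOf]
  simp only [List.mem_map]
  constructor
  · rintro ⟨t, ht, rfl⟩
    obtain ⟨x, y, hf, rfl⟩ := (mem_cellsOf g N t).mp ht
    exact ⟨x, y, hf, rfl⟩
  · rintro ⟨x, y, hf, hv⟩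
    exact ⟨(x, y, pvCell g x y), (mem_cellsOf g N _).mpr ⟨x, y, hf, rfl⟩, hv.symm⟩

theorem mem_map_snd_cellsOf (g : List (List Int)) (N v : Int) :
    v ∈ (cellsOf g N).map (fun c => c.2.1) ↔ v ∈ rowsOf g N := by
  rw [mem_rowsOf]
  simp only [List.mem_map]
  constructor
  · rintro ⟨t, ht, rfl⟩
    obtain ⟨x, y, hf, rfl⟩ := (mem_cellsOf g N t).mp ht
    exact ⟨x, y, hf, rfl⟩
  · rintro ⟨x, y, hf, hv⟩
    exact ⟨(x, y, pvCell g x y), (mem_cellsOf g N _).mpr ⟨x, y, hf, rfl⟩, hv.symm⟩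

theorem shape_eq (g : List (List Int)) (N : Int) :
    pvShape N g = PySem.Set.ofList ((cellsOf g N).map (fun c =>
      (c.1 - pvMin (colsOf g N), c.2.1 - pvMin (rowsOf g N), c.2.2))) := by
  show PySem.Set.ofList ((cellsOf g N).map (fun c =>
      (c.1 - (PySem.List.min? ((cellsOf g N).map (fun c => c.1)) (fun v => v)).getD 0,
       c.2.1 - (PySem.List.min? ((cellsOf g N).map (fun c => c.2.1)) (fun v => v)).getD 0,
       c.2.2))) = _
  rw [min?_congr ((cellsOf g N).map (fun c => c.1)) (colsOf g N) (mem_map_fst_cellsOf g N),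
      min?_congr ((cellsOf g N).map (fun c => c.2.1)) (rowsOf g N) (mem_map_snd_cellsOf g N)]
  rfl

theorem mem_shape (g : List (List Int)) (N : Int) (t : Int × Int × Int) :
    t ∈ pvShape N g ↔ ∃ x y, Pfill g N x y ∧
      t = (x - pvMin (colsOf g N), y - pvMin (rowsOf g N), pvCell g x y) := by
  rw [shape_eq, PySem.Set.mem_ofList]
  simp only [List.mem_map]
  constructor
  · rintro ⟨c, hc, rfl⟩
    obtain ⟨x, y, hf, rfl⟩ := (mem_cellsOf g N c).mp hc
    exact ⟨x, y, hf, rfl⟩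
  · rintro ⟨x, y, hf, rfl⟩
    exact ⟨(x, y, pvCell g x y), (mem_cellsOf g N _).mpr ⟨x, y, hf, rfl⟩, rfl⟩

theorem pvMin_mem (l : List Int) (hne : l ≠ []) : pvMin l ∈ l := by
  unfold pvMin
  cases h : PySem.List.min? l (fun v => v) with
  | none => exact absurd ((PySem.List.min?_eq_none_iff _ _).mp h) hne
  | some m => simpa using PySem.List.min?_mem h

theorem pvMax_mem (l : List Int) (hne : l ≠ []) : pvMax l ∈ l := by
  unfold pvMax
  cases h : PySem.List.max? l (fun v => v) with
  | none => exact absurd ((PySem.List.max?_eq_none_iff _ _).mp h) hne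
  | some m => simpa using PySem.List.max?_mem h

theorem pvMin_le (l : List Int) (v : Int) (hv : v ∈ l) : pvMin l ≤ v := by
  unfold pvMin
  cases h : PySem.List.min? l (fun v => v) with
  | none => exact absurd ((PySem.List.min?_eq_none_iff _ _).mp h) (List.ne_nil_of_mem hv)
  | some m => simpa using PySem.List.min?_isMin h v hv

theorem le_pvMax (l : List Int) (v : Int) (hv : v ∈ l) : v ≤ pvMax l := by
  unfold pvMax
  cases h : PySem.List.max? l (fun v => v) with
  | none => exact absurd ((PySem.List.max?_eq_none_iff _ _).mp h) (List.ne_nil_of_mem hv)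
  | some m => simpa using PySem.List.max?_isMax h v hv

-- A's port rewritten through the canonical collections
theorem A_eq (bd1 bd2 : List (List Int)) :
    rotationally_unique bd1 bd2 =
      (if pvMax (colsOf bd1 (bd1.length : Int)) - pvMin (colsOf bd1 (bd1.length : Int)) + 1
            ≠ pvMax (colsOf bd2 (bd1.length : Int)) - pvMin (colsOf bd2 (bd1.length : Int)) + 1
          ∨ pvMax (rowsOf bd1 (bd1.length : Int)) - pvMin (rowsOf bd1 (bd1.length : Int)) + 1
            ≠ pvMax (rowsOf bd2 (bd1.length : Int)) - pvMin (rowsOf bd2 (bd1.length : Int)) + 1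
        then true
        else
          (PySem.List.pyRange 0 (pvMax (colsOf bd1 (bd1.length : Int)) - pvMin (colsOf bd1 (bd1.length : Int)) + 1) 1).any (fun i =>
            (PySem.List.pyRange 0 (pvMax (rowsOf bd1 (bd1.length : Int)) - pvMin (rowsOf bd1 (bd1.length : Int)) + 1) 1).any (fun j =>
              pvCell bd1 (i + pvMin (colsOf bd1 (bd1.length : Int))) (j + pvMin (rowsOf bd1 (bd1.length : Int)))
                ≠ pvCell bd2 (i + pvMin (colsOf bd2 (bd1.length : Int))) (j + pvMin (rowsOf bd2 (bd1.length : Int)))))) := by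
  have hsplit :
      (PySem.List.pyRange 0 (bd1.length : Int) 1).foldl (fun s x =>
        (PySem.List.pyRange 0 (bd1.length : Int) 1).foldl (fun (s : PySem.Set Int × PySem.Set Int × PySem.Set Int × PySem.Set Int) y =>
          ((if PySem.List.pyGetD (PySem.List.pyGetD bd1 x []) y 0 ≠ 0 then PySem.Set.add s.1 x else s.1),
           (if PySem.List.pyGetD (PySem.List.pyGetD bd1 x []) y 0 ≠ 0 then PySem.Set.add s.2.1 y else s.2.1),
           (if PySem.List.pyGetD (PySem.List.pyGetD bd2 x []) y 0 ≠ 0 then PySem.Set.add s.2.2.1 x else s.2.2.1),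
           (if PySem.List.pyGetD (PySem.List.pyGetD bd2 x []) y 0 ≠ 0 then PySem.Set.add s.2.2.2 y else s.2.2.2))) s)
        (([], [], [], []) : PySem.Set Int × PySem.Set Int × PySem.Set Int × PySem.Set Int)
      = (colsOf bd1 (bd1.length : Int), rowsOf bd1 (bd1.length : Int),
         colsOf bd2 (bd1.length : Int), rowsOf bd2 (bd1.length : Int)) := by
    have hfun :
        (fun (s : PySem.Set Int × PySem.Set Int × PySem.Set Int × PySem.Set Int) (x : Int) =>
          (PySem.List.pyRange 0 (bd1.length : Int) 1).foldl (fun s y =>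
            ((if PySem.List.pyGetD (PySem.List.pyGetD bd1 x []) y 0 ≠ 0 then PySem.Set.add s.1 x else s.1),
             (if PySem.List.pyGetD (PySem.List.pyGetD bd1 x []) y 0 ≠ 0 then PySem.Set.add s.2.1 y else s.2.1),
             (if PySem.List.pyGetD (PySem.List.pyGetD bd2 x []) y 0 ≠ 0 then PySem.Set.add s.2.2.1 x else s.2.2.1),
             (if PySem.List.pyGetD (PySem.List.pyGetD bd2 x []) y 0 ≠ 0 then PySem.Set.add s.2.2.2 y else s.2.2.2))) s)
        = (fun s x =>
            ((PySem.List.pyRange 0 (bd1.length : Int) 1).foldl (fun t y => if pvCell bd1 x y ≠ 0 then PySem.Set.add t x else t) s.1,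
             (PySem.List.pyRange 0 (bd1.length : Int) 1).foldl (fun t y => if pvCell bd1 x y ≠ 0 then PySem.Set.add t y else t) s.2.1,
             (PySem.List.pyRange 0 (bd1.length : Int) 1).foldl (fun t y => if pvCell bd2 x y ≠ 0 then PySem.Set.add t x else t) s.2.2.1,
             (PySem.List.pyRange 0 (bd1.length : Int) 1).foldl (fun t y => if pvCell bd2 x y ≠ 0 then PySem.Set.add t y else t) s.2.2.2)) := by
      funext s x
      exact foldl_prod4 (PySem.List.pyRange 0 (bd1.length : Int) 1)
        (fun t y => if pvCell bd1 x y ≠ 0 then PySem.Set.add t x else t)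
        (fun t y => if pvCell bd1 x y ≠ 0 then PySem.Set.add t y else t)
        (fun t y => if pvCell bd2 x y ≠ 0 then PySem.Set.add t x else t)
        (fun t y => if pvCell bd2 x y ≠ 0 then PySem.Set.add t y else t) s
    rw [hfun, foldl_prod4 (PySem.List.pyRange 0 (bd1.length : Int) 1)
      (fun t x => (PySem.List.pyRange 0 (bd1.length : Int) 1).foldl (fun t y => if pvCell bd1 x y ≠ 0 then PySem.Set.add t x else t) t)
      (fun t x => (PySem.List.pyRange 0 (bd1.length : Int) 1).foldl (fun t y => if pvCell bd1 x y ≠ 0 then PySem.Set.add t y else t) t)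
      (fun t x => (PySem.List.pyRange 0 (bd1.length : Int) 1).foldl (fun t y => if pvCell bd2 x y ≠ 0 then PySem.Set.add t x else t) t)
      (fun t x => (PySem.List.pyRange 0 (bd1.length : Int) 1).foldl (fun t y => if pvCell bd2 x y ≠ 0 then PySem.Set.add t y else t) t)
      (([], [], [], []) : PySem.Set Int × PySem.Set Int × PySem.Set Int × PySem.Set Int)]
    rfl
  simp only [rotationally_unique]
  rw [hsplit]
  rfl

theorem rotationally_unique_main : ∀ (block_data1 : List (List Int)) (block_data2 : List (List Int)), Pre_rotationally_unique block_data1 block_data2 → rotationally_unique block_data1 block_data2 = rotationally_unique_alt block_data1 block_data2 := by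
  intro bd1 bd2 hpre
  obtain ⟨hlen2, hrows1, hrows2, hex1, hex2⟩ := hpre
  have hfill1 : ∃ x y : Int, Pfill bd1 (bd1.length : Int) x y := by
    obtain ⟨x, hx, y, hy, hv⟩ := hex1
    exact ⟨x, y, by exact_mod_cast Int.natCast_nonneg x, by exact_mod_cast hx,
      by exact_mod_cast Int.natCast_nonneg y, by exact_mod_cast hy,
      by simpa [pvCell] using hv⟩
  have hfill2 : ∃ x y : Int, Pfill bd2 (bd1.length : Int) x y := by
    obtain ⟨x, hx, y, hy, hv⟩ := hex2
    exact ⟨x, y, by exact_mod_cast Int.natCast_nonneg x, by exact_mod_cast hx,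
      by exact_mod_cast Int.natCast_nonneg y, by exact_mod_cast hy,
      by simpa [pvCell] using hv⟩
  have hc1ne : colsOf bd1 (bd1.length : Int) ≠ [] := by
    obtain ⟨x, y, h⟩ := hfill1
    exact List.ne_nil_of_mem ((mem_colsOf _ _ x).mpr ⟨x, y, h, rfl⟩)
  have hr1ne : rowsOf bd1 (bd1.length : Int) ≠ [] := by
    obtain ⟨x, y, h⟩ := hfill1
    exact List.ne_nil_of_mem ((mem_rowsOf _ _ y).mpr ⟨x, y, h, rfl⟩)
  have hc2ne : colsOf bd2 (bd1.length : Int) ≠ [] := by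
    obtain ⟨x, y, h⟩ := hfill2
    exact List.ne_nil_of_mem ((mem_colsOf _ _ x).mpr ⟨x, y, h, rfl⟩)
  have hr2ne : rowsOf bd2 (bd1.length : Int) ≠ [] := by
    obtain ⟨x, y, h⟩ := hfill2
    exact List.ne_nil_of_mem ((mem_rowsOf _ _ y).mpr ⟨x, y, h, rfl⟩)
  have hbndc : ∀ (g : List (List Int)) (v : Int), v ∈ colsOf g (bd1.length : Int) → 0 ≤ v ∧ v < (bd1.length : Int) := by
    intro g v hv
    obtain ⟨x, y, ⟨h0, h1, _⟩, rfl⟩ := (mem_colsOf _ _ v).mp hv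
    exact ⟨h0, h1⟩
  have hbndr : ∀ (g : List (List Int)) (v : Int), v ∈ rowsOf g (bd1.length : Int) → 0 ≤ v ∧ v < (bd1.length : Int) := by
    intro g v hv
    obtain ⟨x, y, ⟨_, _, h0, h1, _⟩, rfl⟩ := (mem_rowsOf _ _ v).mp hv
    exact ⟨h0, h1⟩
  set a1 := pvMin (colsOf bd1 (bd1.length : Int)) with ha1def
  set b1 := pvMax (colsOf bd1 (bd1.length : Int)) with hb1def
  set c1 := pvMin (rowsOf bd1 (bd1.length : Int)) with hc1def
  set d1 := pvMax (rowsOf bd1 (bd1.length : Int)) with hd1def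
  set a2 := pvMin (colsOf bd2 (bd1.length : Int)) with ha2def
  set b2 := pvMax (colsOf bd2 (bd1.length : Int)) with hb2def
  set c2 := pvMin (rowsOf bd2 (bd1.length : Int)) with hc2def
  set d2 := pvMax (rowsOf bd2 (bd1.length : Int)) with hd2def
  obtain ⟨ha10, ha1N⟩ := hbndc bd1 a1 (pvMin_mem _ hc1ne)
  obtain ⟨hb10, hb1N⟩ := hbndc bd1 b1 (pvMax_mem _ hc1ne)
  obtain ⟨hc10, hc1N⟩ := hbndr bd1 c1 (pvMin_mem _ hr1ne)
  obtain ⟨hd10, hd1N⟩ := hbndr bd1 d1 (pvMax_mem _ hr1ne)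
  obtain ⟨ha20, ha2N⟩ := hbndc bd2 a2 (pvMin_mem _ hc2ne)
  obtain ⟨hb20, hb2N⟩ := hbndc bd2 b2 (pvMax_mem _ hc2ne)
  obtain ⟨hc20, hc2N⟩ := hbndr bd2 c2 (pvMin_mem _ hr2ne)
  obtain ⟨hd20, hd2N⟩ := hbndr bd2 d2 (pvMax_mem _ hr2ne)
  -- bounds of filled cells
  have hfb1 : ∀ x y, Pfill bd1 (bd1.length : Int) x y → a1 ≤ x ∧ x ≤ b1 ∧ c1 ≤ y ∧ y ≤ d1 := by
    intro x y h
    have hxc : x ∈ colsOf bd1 (bd1.length : Int) := (mem_colsOf _ _ x).mpr ⟨x, y, h, rfl⟩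
    have hyr : y ∈ rowsOf bd1 (bd1.length : Int) := (mem_rowsOf _ _ y).mpr ⟨x, y, h, rfl⟩
    exact ⟨pvMin_le _ _ hxc, le_pvMax _ _ hxc, pvMin_le _ _ hyr, le_pvMax _ _ hyr⟩
  have hfb2 : ∀ x y, Pfill bd2 (bd1.length : Int) x y → a2 ≤ x ∧ x ≤ b2 ∧ c2 ≤ y ∧ y ≤ d2 := by
    intro x y h
    have hxc : x ∈ colsOf bd2 (bd1.length : Int) := (mem_colsOf _ _ x).mpr ⟨x, y, h, rfl⟩
    have hyr : y ∈ rowsOf bd2 (bd1.length : Int) := (mem_rowsOf _ _ y).mpr ⟨x, y, h, rfl⟩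
    exact ⟨pvMin_le _ _ hxc, le_pvMax _ _ hxc, pvMin_le _ _ hyr, le_pvMax _ _ hyr⟩
  -- extremes are attained by filled cells
  have hattb1 : ∃ y, Pfill bd1 (bd1.length : Int) b1 y := by
    obtain ⟨x, y, h, hx⟩ := (mem_colsOf _ _ b1).mp (pvMax_mem _ hc1ne)
    exact ⟨y, hx ▸ h⟩
  have hattd1 : ∃ x, Pfill bd1 (bd1.length : Int) x d1 := by
    obtain ⟨x, y, h, hy⟩ := (mem_rowsOf _ _ d1).mp (pvMax_mem _ hr1ne)
    exact ⟨x, hy ▸ h⟩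
  have hattb2 : ∃ y, Pfill bd2 (bd1.length : Int) b2 y := by
    obtain ⟨x, y, h, hx⟩ := (mem_colsOf _ _ b2).mp (pvMax_mem _ hc2ne)
    exact ⟨y, hx ▸ h⟩
  have hattd2 : ∃ x, Pfill bd2 (bd1.length : Int) x d2 := by
    obtain ⟨x, y, h, hy⟩ := (mem_rowsOf _ _ d2).mp (pvMax_mem _ hr2ne)
    exact ⟨x, hy ▸ h⟩
  -- shape membership with the current abbreviations
  have hS1 : ∀ t, t ∈ pvShape (bd1.length : Int) bd1 ↔
      ∃ x y, Pfill bd1 (bd1.length : Int) x y ∧ t = (x - a1, y - c1, pvCell bd1 x y) :=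
    fun t => mem_shape bd1 (bd1.length : Int) t
  have hS2 : ∀ t, t ∈ pvShape (bd1.length : Int) bd2 ↔
      ∃ x y, Pfill bd2 (bd1.length : Int) x y ∧ t = (x - a2, y - c2, pvCell bd2 x y) :=
    fun t => mem_shape bd2 (bd1.length : Int) t
  -- the central equivalence: equal shape sets ↔ equal dimensions and equal box cells
  have hEquiv : (∀ t, t ∈ pvShape (bd1.length : Int) bd1 ↔ t ∈ pvShape (bd1.length : Int) bd2) ↔
      (b1 - a1 = b2 - a2 ∧ d1 - c1 = d2 - c2 ∧
       ∀ i, 0 ≤ i → i ≤ b1 - a1 → ∀ j, 0 ≤ j → j ≤ d1 - c1 →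
         pvCell bd1 (i + a1) (j + c1) = pvCell bd2 (i + a2) (j + c2)) := by
    constructor
    · intro hS
      have hw : b1 - a1 = b2 - a2 := by
        obtain ⟨y, hf⟩ := hattb1
        obtain ⟨x', y', hf', ht⟩ := (hS2 _).mp ((hS _).mp ((hS1 _).mpr ⟨b1, y, hf, rfl⟩))
        obtain ⟨y2, hf2⟩ := hattb2
        obtain ⟨x'', y'', hf'', ht'⟩ := (hS1 _).mp ((hS _).mpr ((hS2 _).mpr ⟨b2, y2, hf2, rfl⟩))
        have h1 := (hfb2 _ _ hf').2.1
        have h2 := (hfb1 _ _ hf'').2.1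
        simp only [Prod.mk.injEq] at ht ht'
        omega
      have hh : d1 - c1 = d2 - c2 := by
        obtain ⟨x, hf⟩ := hattd1
        obtain ⟨x', y', hf', ht⟩ := (hS2 _).mp ((hS _).mp ((hS1 _).mpr ⟨x, d1, hf, rfl⟩))
        obtain ⟨x2, hf2⟩ := hattd2
        obtain ⟨x'', y'', hf'', ht'⟩ := (hS1 _).mp ((hS _).mpr ((hS2 _).mpr ⟨x2, d2, hf2, rfl⟩))
        have h1 := (hfb2 _ _ hf').2.2.2
        have h2 := (hfb1 _ _ hf'').2.2.2
        simp only [Prod.mk.injEq] at ht ht'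
        omega
      refine ⟨hw, hh, fun i hi0 hi j hj0 hj => ?_⟩
      by_cases hp : pvCell bd1 (i + a1) (j + c1) = 0
      · by_cases hq : pvCell bd2 (i + a2) (j + c2) = 0
        · rw [hp, hq]
        · have hf2 : Pfill bd2 (bd1.length : Int) (i + a2) (j + c2) :=
            ⟨by omega, by omega, by omega, by omega, hq⟩
          have hmem : (i, j, pvCell bd2 (i + a2) (j + c2)) ∈ pvShape (bd1.length : Int) bd2 := by
            refine (hS2 _).mpr ⟨i + a2, j + c2, hf2, ?_⟩
            simp only [Prod.mk.injEq]
            exact ⟨by omega, by omega, trivial⟩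
          obtain ⟨x, y, hf, ht⟩ := (hS1 _).mp ((hS _).mpr hmem)
          simp only [Prod.mk.injEq] at ht
          obtain ⟨h1, h2, h3⟩ := ht
          have hx : x = i + a1 := by omega
          have hy : y = j + c1 := by omega
          rw [hx, hy] at hf
          exact absurd hp hf.2.2.2.2
      · have hf1 : Pfill bd1 (bd1.length : Int) (i + a1) (j + c1) :=
          ⟨by omega, by omega, by omega, by omega, hp⟩
        have hmem : (i, j, pvCell bd1 (i + a1) (j + c1)) ∈ pvShape (bd1.length : Int) bd1 := by
          refine (hS1 _).mpr ⟨i + a1, j + c1, hf1, ?_⟩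
          simp only [Prod.mk.injEq]
          exact ⟨by omega, by omega, trivial⟩
        obtain ⟨x, y, hf, ht⟩ := (hS2 _).mp ((hS _).mp hmem)
        simp only [Prod.mk.injEq] at ht
        obtain ⟨h1, h2, h3⟩ := ht
        have hx : x = i + a2 := by omega
        have hy : y = j + c2 := by omega
        rw [hx, hy] at h3
        omega
    · rintro ⟨hw, hh, hcells⟩ t
      constructor
      · intro ht
        obtain ⟨x, y, hf, rfl⟩ := (hS1 _).mp ht
        obtain ⟨hax, hxb, hcy, hyd⟩ := hfb1 _ _ hf
        have hc := hcells (x - a1) (by omega) (by omega) (y - c1) (by omega) (by omega)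
        have hx1 : x - a1 + a1 = x := by omega
        have hy1 : y - c1 + c1 = y := by omega
        rw [hx1, hy1] at hc
        have hf2 : Pfill bd2 (bd1.length : Int) (x - a1 + a2) (y - c1 + c2) :=
          ⟨by omega, by omega, by omega, by omega, by rw [← hc]; exact hf.2.2.2.2⟩
        refine (hS2 _).mpr ⟨x - a1 + a2, y - c1 + c2, hf2, ?_⟩
        simp only [Prod.mk.injEq]
        exact ⟨by omega, by omega, by rw [← hc]⟩
      · intro ht
        obtain ⟨x, y, hf, rfl⟩ := (hS2 _).mp ht
        obtain ⟨hax, hxb, hcy, hyd⟩ := hfb2 _ _ hf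
        have hc := hcells (x - a2) (by omega) (by omega) (y - c2) (by omega) (by omega)
        have hx1 : x - a2 + a2 = x := by omega
        have hy1 : y - c2 + c2 = y := by omega
        rw [hx1, hy1] at hc
        have hf1 : Pfill bd1 (bd1.length : Int) (x - a2 + a1) (y - c2 + c1) :=
          ⟨by omega, by omega, by omega, by omega, by rw [hc]; exact hf.2.2.2.2⟩
        refine (hS1 _).mpr ⟨x - a2 + a1, y - c2 + c1, hf1, ?_⟩
        simp only [Prod.mk.injEq]
        exact ⟨by omega, by omega, by rw [hc]⟩
  -- assemble the booleans
  have halt : rotationally_unique_alt bd1 bd2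
      = !(PySem.Set.equal (pvShape (bd1.length : Int) bd1) (pvShape (bd1.length : Int) bd2)) := rfl
  rw [A_eq, halt, ← ha1def, ← hb1def, ← hc1def, ← hd1def, ← ha2def, ← hb2def, ← hc2def, ← hd2def]
  by_cases hE : ∀ t, t ∈ pvShape (bd1.length : Int) bd1 ↔ t ∈ pvShape (bd1.length : Int) bd2
  · rw [(PySem.Set.equal_iff _ _).mpr hE]
    obtain ⟨hw, hh, hcells⟩ := hEquiv.mp hE
    rw [if_neg (by push Not; omega)]
    simp only [Bool.not_true]
    rw [List.any_eq_false]
    intro i hi hinner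
    rw [List.any_eq_true] at hinner
    obtain ⟨j, hj, hcell⟩ := hinner
    simp only [PySem.List.mem_pyRange_one] at hi hj
    simp only [decide_eq_true_eq] at hcell
    exact hcell (hcells i hi.1 (by omega) j hj.1 (by omega))
  · have hne : PySem.Set.equal (pvShape (bd1.length : Int) bd1) (pvShape (bd1.length : Int) bd2) = false :=
      Bool.eq_false_iff.mpr (fun h => hE ((PySem.Set.equal_iff _ _).mp h))
    rw [hne]
    by_cases hdim : b1 - a1 + 1 ≠ b2 - a2 + 1 ∨ d1 - c1 + 1 ≠ d2 - c2 + 1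
    · rw [if_pos hdim]; rfl
    · rw [if_neg hdim]
      push Not at hdim
      have hnc : ¬ ∀ i, 0 ≤ i → i ≤ b1 - a1 → ∀ j, 0 ≤ j → j ≤ d1 - c1 →
          pvCell bd1 (i + a1) (j + c1) = pvCell bd2 (i + a2) (j + c2) := by
        intro hcells
        exact hE (hEquiv.mpr ⟨by omega, by omega, hcells⟩)
      push Not at hnc
      obtain ⟨i, hi0, hi, j, hj0, hj, hne'⟩ := hnc
      simp only [Bool.not_false, List.any_eq_true, PySem.List.mem_pyRange_one, decide_eq_true_eq, ne_eq]
      exact ⟨i, ⟨hi0, by omega⟩, j, ⟨hj0, by omega⟩, hne'⟩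

-- ===== VERDICT (by name: the statement is the Claim_ definition above) =====
theorem rotationally_unique_spec : Claim_equal_rotationally_unique := by
  intro b1 b2 _ hpre
  exact rotationally_unique_main b1 b2 hpre
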